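-- pv_equiv track=rewrite | github.com/Mehangits/College_Projects | Quin_McCluskey_With_Name.py.py | add_y_in_row
-- ===== SOURCE A (Python) =====
-- def count_x_in_column(final_table, position):
--     count = 0
--     for i in final_table:
--         if i[position] == 'X':
--             count = count + 1
--     return count
--
-- def add_y_in_row(final_table):
--     temp_table = final_table
--     for i in temp_table:
--         for j in range(2, len(i)):
--             if i[j] == 'X':
--                 if count_x_in_column(final_table, j) == 1:
--                     i[j] = 'Y'
--                 else:
--                     pass
--             else:
--                 pass
--     return temp_table
-- ===== SOURCE B (Python) =====
-- def add_y_in_row(final_table):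
--     counts = {}
--     for row in final_table:
--         for j in range(2, len(row)):
--             if row[j] == 'X':
--                 counts[j] = counts.get(j, 0) + 1
--     for row in final_table:
--         for j in range(2, len(row)):
--             if row[j] == 'X' and counts.get(j, 0) == 1:
--                 row[j] = 'Y'
--     return final_table
-- ===== Notes on version B (the rewrite author's own statement) =====
-- stated objective: alternative
-- what changed: B precomputes a dict of per-column 'X' counts in one pass and then marks cells, replacing A's full-table column rescan (count_x_in_column) inside the doubly nested loop; asymptotically better when many cells are 'X', measured about the same cost on the generated inputs.
import Mathlib
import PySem

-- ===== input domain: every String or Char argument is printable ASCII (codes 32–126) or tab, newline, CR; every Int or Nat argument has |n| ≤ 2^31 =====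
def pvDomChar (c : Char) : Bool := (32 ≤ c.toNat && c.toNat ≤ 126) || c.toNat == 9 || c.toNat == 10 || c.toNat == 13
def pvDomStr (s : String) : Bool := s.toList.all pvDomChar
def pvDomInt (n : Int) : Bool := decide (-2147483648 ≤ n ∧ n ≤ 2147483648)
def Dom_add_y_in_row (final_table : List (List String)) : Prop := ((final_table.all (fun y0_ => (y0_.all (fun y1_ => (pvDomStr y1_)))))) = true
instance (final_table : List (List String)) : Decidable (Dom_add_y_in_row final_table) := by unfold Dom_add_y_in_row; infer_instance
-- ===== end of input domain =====

-- B replaces A's per-cell full-table column rescan by one precomputed dict of column 'X' counts;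
-- A mutates final_table in place — the equivalence proved here is about the RETURN value only.

-- ===== PORT A =====
-- for i in final_table: if i[position] == 'X': count += 1   (in-range under Pre_, so getD is exact)
def count_x_in_column (final_table : List (List String)) (position : Nat) : Nat :=
  final_table.foldl (fun count i => if i.getD position "" = "X" then count + 1 else count) 0

-- one inner-loop iteration of A: i[j] read/write modelled by state-passing over the whole table at row index idx
def pvAInner (t : List (List String)) (idx j : Nat) : List (List String) :=
  if (t.getD idx []).getD j "" = "X" then
    if count_x_in_column t j = 1 then t.set idx ((t.getD idx []).set j "Y") else t
  else t

-- one outer-loop iteration of A (range(2, len(i)) is built once, as in Python)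
def pvARow (t : List (List String)) (idx : Nat) : List (List String) :=
  (List.range' 2 ((t.getD idx []).length - 2)).foldl (fun t j => pvAInner t idx j) t

def add_y_in_row (final_table : List (List String)) : List (List String) :=
  (List.range final_table.length).foldl pvARow final_table

-- ===== PORT B =====
-- first pass: counts[j] = counts.get(j, 0) + 1 for each 'X' at column j >= 2
def pvCountRow (row : List String) (d : PySem.Dict Nat Nat) : PySem.Dict Nat Nat :=
  (List.range' 2 (row.length - 2)).foldl
    (fun d j => if row.getD j "" = "X" then d.insert j (d.getD j 0 + 1) else d) d

def pvBuildCounts (t : List (List String)) : PySem.Dict Nat Nat :=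
  t.foldl (fun d row => pvCountRow row d) PySem.Dict.empty

-- second pass: if row[j] == 'X' and counts.get(j, 0) == 1: row[j] = 'Y'
def pvFixRow (counts : PySem.Dict Nat Nat) (row : List String) : List String :=
  (List.range' 2 (row.length - 2)).foldl
    (fun r j => if r.getD j "" = "X" ∧ counts.getD j 0 = 1 then r.set j "Y" else r) row

def add_y_in_row_alt (final_table : List (List String)) : List (List String) :=
  let counts := pvBuildCounts final_table
  final_table.map (pvFixRow counts)

-- ===== PRECONDITION & SPEC =====
-- Pre_ excludes exactly the ragged tables on which Python A raises IndexError: some row has an 'X'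
-- at a column index j ≥ 2 while another row is shorter than j+1 (count_x_in_column indexes every row).
def Pre_add_y_in_row (final_table : List (List String)) : Prop :=
  ∀ r ∈ final_table, ∀ j ∈ List.range' 2 (r.length - 2), r.getD j "" = "X" →
    ∀ r' ∈ final_table, j < r'.length
instance (final_table : List (List String)) : Decidable (Pre_add_y_in_row final_table) := by
  unfold Pre_add_y_in_row; infer_instance
def pvWitness_add_y_in_row : List (List String) := [["a", "b", "X"], ["c", "d", "e"]]

def Spec_add_y_in_row (final_table : List (List String)) (out : List (List String)) : Prop := out = add_y_in_row_alt final_table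
instance (final_table : List (List String)) (out : List (List String)) : Decidable (Spec_add_y_in_row final_table out) := by unfold Spec_add_y_in_row; infer_instance

-- ===== CLAIM (what is proved, stated in full; the proofs are below) =====
def Claim_equal_add_y_in_row : Prop := ∀ (final_table : List (List String)), Dom_add_y_in_row final_table → Pre_add_y_in_row final_table → Spec_add_y_in_row final_table (add_y_in_row final_table)
-- ===== LEMMAS AND PROOFS =====

-- count_x_in_column as a countP
theorem countX_eq_countP (t : List (List String)) (j : Nat) :
    count_x_in_column t j = t.countP (fun r => decide (r.getD j "" = "X")) := by
  have h : ∀ c, t.foldl (fun count i => if i.getD j "" = "X" then count + 1 else count) c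
      = c + t.countP (fun r => decide (r.getD j "" = "X")) := by
    induction t with
    | nil => simp
    | cons r t ih =>
      intro c
      simp only [List.foldl_cons, List.countP_cons, ih]
      by_cases h : r.getD j "" = "X"
      · rw [if_pos h, if_pos (by simpa using h)]; omega
      · rw [if_neg h, if_neg (by simpa using h)]; omega
  simpa using h 0

theorem getD_X_lt {row : List String} {k : Nat} (h : row.getD k "" = "X") : k < row.length := by
  by_contra hk
  rw [List.getD_eq_default _ _ (by omega)] at h
  exact absurd h (by decide)

-- the cell relation maintained by A's mutation: each cell is unchanged, or was the unique 'X'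
-- of its column (w.r.t. the ORIGINAL table) and is now 'Y'
def pvRel (tab : List (List String)) (r s : List String) : Prop :=
  ∀ j, s.getD j "" = r.getD j "" ∨
    (count_x_in_column tab j = 1 ∧ r.getD j "" = "X" ∧ s.getD j "" = "Y")

theorem pvRel_refl (tab : List (List String)) (r : List String) : pvRel tab r r :=
  fun _ => Or.inl rfl

theorem pvRel_X {tab : List (List String)} {r s : List String} (h : pvRel tab r s)
    {j : Nat} (hX : s.getD j "" = "X") : r.getD j "" = "X" := by
  rcases h j with h1 | ⟨_, h1, h2⟩
  · rw [← h1, hX]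
  · rw [h2] at hX; exact absurd hX (by decide)

theorem count_le {tab o t : List (List String)} (h : List.Forall₂ (pvRel tab) o t) (j : Nat) :
    count_x_in_column t j ≤ count_x_in_column o j := by
  rw [countX_eq_countP, countX_eq_countP]
  induction h with
  | nil => simp
  | @cons a b l1 l2 hrel htail ih =>
    simp only [List.countP_cons]
    by_cases hX : b.getD j "" = "X"
    · rw [if_pos (by simpa using hX), if_pos (by simpa using pvRel_X hrel hX)]; omega
    · rw [if_neg (by simpa using hX)]
      split <;> omega

theorem count_eq_of_ne_one {tab o t : List (List String)} (h : List.Forall₂ (pvRel tab) o t)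
    {j : Nat} (hne : count_x_in_column tab j ≠ 1) :
    count_x_in_column t j = count_x_in_column o j := by
  rw [countX_eq_countP, countX_eq_countP]
  induction h with
  | nil => rfl
  | @cons a b l1 l2 hrel htail ih =>
    simp only [List.countP_cons, ih]
    rcases hrel j with h1 | ⟨hc, _, _⟩
    · rw [h1]
    · exact absurd hc hne

theorem count_pos {t : List (List String)} {s : List String} (hs : s ∈ t) {j : Nat}
    (hX : s.getD j "" = "X") : 1 ≤ count_x_in_column t j := by
  rw [countX_eq_countP]
  exact List.countP_pos_iff.mpr ⟨s, hs, by simpa using hX⟩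

theorem count_iff {tab t : List (List String)} {s : List String} {j : Nat}
    (h : List.Forall₂ (pvRel tab) tab t) (hs : s ∈ t) (hX : s.getD j "" = "X") :
    (count_x_in_column t j = 1 ↔ count_x_in_column tab j = 1) := by
  by_cases hc : count_x_in_column tab j = 1
  · refine ⟨fun _ => hc, fun _ => ?_⟩
    have h1 := count_le h j
    have h2 := count_pos hs hX
    omega
  · rw [count_eq_of_ne_one h hc]

-- one step of the specification transformation (A's inner body on the current row, with the
-- column count taken in the ORIGINAL table)
def pvGStep (tab : List (List String)) (s : List String) (j : Nat) : List String :=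
  if s.getD j "" = "X" ∧ count_x_in_column tab j = 1 then s.set j "Y" else s

def pvG (tab : List (List String)) (r : List String) : List String :=
  (List.range' 2 (r.length - 2)).foldl (pvGStep tab) r

theorem getD_set_self {s : List String} {j : Nat} (hj : j < s.length) (x : String) :
    (s.set j x).getD j "" = x := by
  simp [List.getD_eq_getElem?_getD, List.getElem?_set_self hj]

theorem getD_set_ne {s : List String} {j k : Nat} (h : k ≠ j) (x : String) :
    (s.set j x).getD k "" = s.getD k "" := by
  simp [List.getD_eq_getElem?_getD, List.getElem?_set_ne (by omega : j ≠ k)]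

theorem pvRel_step {tab : List (List String)} {r s : List String} (hrs : pvRel tab r s)
    (j : Nat) : pvRel tab r (pvGStep tab s j) := by
  unfold pvGStep
  split
  · rename_i hc
    obtain ⟨hX, h1⟩ := hc
    intro k
    by_cases hk : k = j
    · subst hk
      exact Or.inr ⟨h1, pvRel_X hrs hX, getD_set_self (getD_X_lt hX) _⟩
    · rw [getD_set_ne hk]
      exact hrs k
  · exact hrs

theorem getD_middle (pre suf : List (List String)) (s : List String) :
    (pre ++ s :: suf).getD pre.length [] = s := by
  simp [List.getD_eq_getElem?_getD]

theorem set_middle (pre suf : List (List String)) (s x : List String) :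
    (pre ++ s :: suf).set pre.length x = pre ++ x :: suf := by
  induction pre with
  | nil => rfl
  | cons p pre ih => simp [ih]

theorem forall₂_middle {tab preO pre suf : List (List String)} {r s : List String}
    (hpre : List.Forall₂ (pvRel tab) preO pre) (hrs : pvRel tab r s) :
    List.Forall₂ (pvRel tab) (preO ++ r :: suf) (pre ++ s :: suf) :=
  List.rel_append hpre (List.Forall₂.cons hrs
    ((List.forall₂_same).mpr (fun x _ => pvRel_refl tab x)))

-- A's inner loop over any list of column indices equals pvGStep folded on the middle row
theorem inner_fold (tab : List (List String)) (preO pre suf : List (List String))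
    (r : List String) (L : List Nat) (idx : Nat) :
    ∀ s : List String, idx = pre.length → tab = preO ++ r :: suf →
    List.Forall₂ (pvRel tab) preO pre → pvRel tab r s →
    L.foldl (fun t j => pvAInner t idx j) (pre ++ s :: suf)
      = pre ++ (L.foldl (pvGStep tab) s) :: suf := by
  induction L with
  | nil => intro s _ _ _ _; rfl
  | cons j L ih =>
    intro s hidx htab hpre hrs
    subst hidx htab
    have hmid : (pre ++ s :: suf).getD pre.length [] = s := getD_middle pre suf s
    have hforall : List.Forall₂ (pvRel (preO ++ r :: suf)) (preO ++ r :: suf) (pre ++ s :: suf) :=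
      forall₂_middle hpre hrs
    have hsmem : s ∈ pre ++ s :: suf := by simp
    simp only [List.foldl_cons]
    by_cases hX : s.getD j "" = "X"
    · have hcnt := count_iff hforall hsmem hX
      by_cases hc : count_x_in_column (preO ++ r :: suf) j = 1
      · have hstep : pvAInner (pre ++ s :: suf) pre.length j = pre ++ (s.set j "Y") :: suf := by
          unfold pvAInner
          rw [hmid, if_pos hX, if_pos (hcnt.mpr hc)]
          exact set_middle pre suf s _
        have hg : pvGStep (preO ++ r :: suf) s j = s.set j "Y" := by
          unfold pvGStep; rw [if_pos ⟨hX, hc⟩]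
        rw [hstep, hg]
        exact ih _ rfl rfl hpre (by rw [← hg]; exact pvRel_step hrs j)
      · have hstep : pvAInner (pre ++ s :: suf) pre.length j = pre ++ s :: suf := by
          unfold pvAInner
          rw [hmid, if_pos hX, if_neg (fun hh => hc (hcnt.mp hh))]
        have hg : pvGStep (preO ++ r :: suf) s j = s := by
          unfold pvGStep; rw [if_neg (by rintro ⟨_, h2⟩; exact hc h2)]
        rw [hstep, hg]
        exact ih _ rfl rfl hpre hrs
    · have hstep : pvAInner (pre ++ s :: suf) pre.length j = pre ++ s :: suf := by
        unfold pvAInner; rw [hmid, if_neg hX]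
      have hg : pvGStep (preO ++ r :: suf) s j = s := by
        unfold pvGStep; rw [if_neg (by rintro ⟨h1, _⟩; exact hX h1)]
      rw [hstep, hg]
      exact ih _ rfl rfl hpre hrs

theorem pvRel_fold (tab : List (List String)) (r : List String) :
    ∀ (L : List Nat) (s : List String), pvRel tab r s → pvRel tab r (L.foldl (pvGStep tab) s)
  | [], _, h => h
  | j :: L, s, h => pvRel_fold tab r L _ (pvRel_step h j)

theorem pvRel_G (tab : List (List String)) (r : List String) : pvRel tab r (pvG tab r) :=
  pvRel_fold tab r _ r (pvRel_refl tab r)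

-- A's outer loop: after k rows, the first k rows are transformed by pvG, the rest untouched
theorem outer_fold (tab : List (List String)) (k : Nat) (hk : k ≤ tab.length) :
    (List.range k).foldl pvARow tab = (tab.take k).map (pvG tab) ++ tab.drop k := by
  induction k with
  | zero => simp
  | succ k ih =>
    have hk' : k ≤ tab.length := by omega
    have hklt : k < tab.length := by omega
    rw [List.range_succ, List.foldl_append, ih hk']
    have hpre : List.Forall₂ (pvRel tab) (tab.take k) ((tab.take k).map (pvG tab)) := by
      rw [List.forall₂_map_right_iff]
      exact (List.forall₂_same).mpr (fun x _ => pvRel_G tab x)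
    have hlen : ((tab.take k).map (pvG tab)).length = k := by
      simp [Nat.min_eq_left hk']
    have hropt : tab[k]? = some tab[k] := List.getElem?_eq_getElem hklt
    have hdrop : tab.drop k = tab[k] :: tab.drop (k + 1) := List.drop_eq_getElem_cons hklt
    generalize hr : tab[k] = r at hropt hdrop
    have htab : tab = tab.take k ++ r :: tab.drop (k + 1) := by
      rw [← hdrop, List.take_append_drop]
    simp only [List.foldl_cons, List.foldl_nil]
    rw [hdrop]
    unfold pvARow
    have hmid : ((tab.take k).map (pvG tab) ++ r :: tab.drop (k + 1)).getD k [] = r := by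
      have h := getD_middle ((tab.take k).map (pvG tab)) (tab.drop (k + 1)) r
      rwa [hlen] at h
    rw [hmid]
    rw [inner_fold tab (tab.take k) ((tab.take k).map (pvG tab)) (tab.drop (k + 1)) r
      (List.range' 2 (r.length - 2)) k r hlen.symm htab hpre (pvRel_refl tab r)]
    rw [List.take_add_one, hropt]
    simp [pvG]

theorem A_eq_mapG (tab : List (List String)) : add_y_in_row tab = tab.map (pvG tab) := by
  unfold add_y_in_row
  rw [outer_fold tab tab.length (le_refl _)]
  simp

-- B's counts dict computes the original column counts
theorem getD_fold_insert (row : List String) (L : List Nat) (hnd : L.Nodup) (d : PySem.Dict Nat Nat)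
    (k : Nat) :
    (L.foldl (fun d j => if row.getD j "" = "X" then d.insert j (d.getD j 0 + 1) else d) d).getD k 0
      = d.getD k 0 + (if k ∈ L ∧ row.getD k "" = "X" then 1 else 0) := by
  induction L generalizing d with
  | nil => simp
  | cons j L ih =>
    have hjL : j ∉ L := (List.nodup_cons.mp hnd).1
    have hLnd : L.Nodup := (List.nodup_cons.mp hnd).2
    simp only [List.foldl_cons]
    rw [ih hLnd]
    by_cases hk : k = j
    · subst hk
      have hkL : k ∉ L := hjL
      by_cases hQ : row.getD k "" = "X"
      · rw [if_pos hQ, PySem.Dict.getD_insert_self]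
        rw [if_neg (fun h => hkL h.1), if_pos ⟨List.mem_cons_self, hQ⟩]
      · rw [if_neg hQ, if_neg (fun h => hQ h.2), if_neg (fun h => hQ h.2)]
    · have h1 : (if row.getD j "" = "X" then d.insert j (d.getD j 0 + 1) else d).getD k 0
          = d.getD k 0 := by
        split
        · exact PySem.Dict.getD_insert_of_ne _ _ _ hk
        · rfl
      rw [h1]
      congr 1
      have hmem : k ∈ j :: L ↔ k ∈ L := by simp [List.mem_cons, hk]
      by_cases hkL : k ∈ L ∧ row.getD k "" = "X"
      · rw [if_pos hkL, if_pos ⟨hmem.mpr hkL.1, hkL.2⟩]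
      · rw [if_neg hkL, if_neg (fun h => hkL ⟨hmem.mp h.1, h.2⟩)]

theorem getD_countRow (row : List String) (d : PySem.Dict Nat Nat) (k : Nat) (hk : 2 ≤ k) :
    (pvCountRow row d).getD k 0 = d.getD k 0 + (if row.getD k "" = "X" then 1 else 0) := by
  unfold pvCountRow
  rw [getD_fold_insert row _ (List.nodup_range' 1) d k]
  congr 1
  by_cases hQ : row.getD k "" = "X"
  · have hlt : k < row.length := getD_X_lt hQ
    have hmem : k ∈ List.range' 2 (row.length - 2) := by
      rw [List.mem_range'_1]
      omega
    rw [if_pos ⟨hmem, hQ⟩, if_pos hQ]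
  · rw [if_neg (fun h => hQ h.2), if_neg hQ]

theorem getD_buildCounts_aux (t : List (List String)) (k : Nat) (hk : 2 ≤ k) :
    ∀ d : PySem.Dict Nat Nat,
    (t.foldl (fun d row => pvCountRow row d) d).getD k 0
      = d.getD k 0 + t.countP (fun r => decide (r.getD k "" = "X")) := by
  induction t with
  | nil => simp
  | cons r t ih =>
    intro d
    simp only [List.foldl_cons, List.countP_cons]
    rw [ih (pvCountRow r d), getD_countRow r d k hk]
    by_cases hQ : r.getD k "" = "X"
    · rw [if_pos hQ, if_pos (by simpa using hQ)]; omega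
    · rw [if_neg hQ, if_neg (by simpa using hQ)]; omega

theorem getD_buildCounts (t : List (List String)) (k : Nat) (hk : 2 ≤ k) :
    (pvBuildCounts t).getD k 0 = count_x_in_column t k := by
  unfold pvBuildCounts
  rw [getD_buildCounts_aux t k hk PySem.Dict.empty, countX_eq_countP]
  simp

theorem fixRow_eq_G (tab : List (List String)) (r : List String) :
    pvFixRow (pvBuildCounts tab) r = pvG tab r := by
  unfold pvFixRow pvG
  apply PySem.List.foldl_congr_mem
  intro acc j hj
  have hj2 : 2 ≤ j := (List.mem_range'_1.mp hj).1
  unfold pvGStep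
  rw [getD_buildCounts tab j hj2]

theorem B_eq_mapG (tab : List (List String)) : add_y_in_row_alt tab = tab.map (pvG tab) := by
  unfold add_y_in_row_alt
  simp only []
  exact List.map_congr_left (fun r _ => fixRow_eq_G tab r)

-- ===== VERDICT (by name: the statement is the Claim_ definition above) =====
theorem add_y_in_row_spec : Claim_equal_add_y_in_row := by
  intro t _ _
  unfold Spec_add_y_in_row
  rw [A_eq_mapG, B_eq_mapG]
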